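-- pv_equiv track=rewrite | github.com/dwiddows/lplangid | experiments/eval_tool.py | sample_from_big_string
-- ===== SOURCE A (Python) =====
-- def sample_from_big_string(big_str: str, text_len: int, num_samples: int):
--     texts = []
--     for i in range(num_samples):
--         region_start = (i * len(big_str)) // num_samples
--         start = big_str.find(" ", region_start)
--         if start == -1:
--             continue
--         end = big_str.find(" ", start + text_len)
--         if end == -1:
--             end = 0
--         texts.append(big_str[start:end])
--     return texts
-- ===== SOURCE B (Python) =====
-- from bisect import bisect_left
--
--
-- def _space_at_or_after(positions, n, k):
--     # str.find start semantics: a negative start counts from the end, clamped at 0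
--     if k < 0:
--         k = max(0, n + k)
--     j = bisect_left(positions, k)
--     return positions[j] if j < len(positions) else None
--
--
-- def sample_from_big_string(big_str: str, text_len: int, num_samples: int):
--     n = len(big_str)
--     positions = [k for k, c in enumerate(big_str) if c == " "]
--     texts = []
--     for i in range(num_samples):
--         start = _space_at_or_after(positions, n, (i * n) // num_samples)
--         if start is None:
--             continue
--         end = _space_at_or_after(positions, n, start + text_len)
--         texts.append(big_str[start:end] if end is not None else "")
--     return texts
-- ===== Notes on version B (the rewrite author's own statement) =====
-- stated objective: alternative
-- what changed: Replaces A's per-sample linear str.find scans with one precomputed sorted list of all space positions queried by bisect_left (binary search) per sample.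
import Mathlib
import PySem

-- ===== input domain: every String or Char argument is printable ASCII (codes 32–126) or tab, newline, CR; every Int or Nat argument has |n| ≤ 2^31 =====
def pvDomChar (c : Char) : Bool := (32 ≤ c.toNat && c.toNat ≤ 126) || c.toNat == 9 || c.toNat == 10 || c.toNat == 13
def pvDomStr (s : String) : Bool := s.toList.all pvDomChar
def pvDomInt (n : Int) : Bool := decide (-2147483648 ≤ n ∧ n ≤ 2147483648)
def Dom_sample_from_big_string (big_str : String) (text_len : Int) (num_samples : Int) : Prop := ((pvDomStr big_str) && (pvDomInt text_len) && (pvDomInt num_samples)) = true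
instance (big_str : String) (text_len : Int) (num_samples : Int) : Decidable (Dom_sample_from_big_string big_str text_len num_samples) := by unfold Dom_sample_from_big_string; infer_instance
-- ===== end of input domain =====

-- B replaces A's repeated linear str.find scans by one precomputed sorted list of space
-- positions queried with bisect_left (same return value; objective: alternative decomposition).

-- ===== PORT A =====
def sample_from_big_string (big_str : String) (text_len : Int) (num_samples : Int) : List String :=
  (PySem.List.pyRange 0 num_samples 1).foldl (fun texts i =>
    let region_start := PySem.Int.floordiv (i * PySem.Str.len big_str) num_samples
    let start := PySem.Str.findFrom big_str " " region_start
    if start = -1 then texts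
    else
      let e := PySem.Str.findFrom big_str " " (start + text_len)
      let e := if e = -1 then 0 else e
      texts ++ [PySem.Str.slice big_str (some start) (some e)]) []

-- ===== PORT B =====
-- Source B's helper: first space position ≥ k (str.find start semantics for negative k), via bisect_left
def spaceAtOrAfter (positions : List Int) (n : Int) (k : Int) : Option Int :=
  let k' := if k < 0 then max 0 (n + k) else k
  let j := PySem.List.bisectLeft positions k'
  if h : j < positions.length then some positions[j] else none

def sample_from_big_string_alt (big_str : String) (text_len : Int) (num_samples : Int) : List String :=
  let n : Int := PySem.Str.len big_str
  let positions : List Int :=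
    ((PySem.List.enumerate big_str.toList).filter (fun p => p.2 == ' ')).map (fun p => p.1)
  (PySem.List.pyRange 0 num_samples 1).foldl (fun texts i =>
    match spaceAtOrAfter positions n (PySem.Int.floordiv (i * n) num_samples) with
    | none => texts
    | some start =>
      match spaceAtOrAfter positions n (start + text_len) with
      | none => texts ++ [""]
      | some e => texts ++ [PySem.Str.slice big_str (some start) (some e)]) []

-- ===== PRECONDITION & SPEC =====
def Spec_sample_from_big_string (big_str : String) (text_len : Int) (num_samples : Int) (out : List String) : Prop := out = sample_from_big_string_alt big_str text_len num_samples
instance (big_str : String) (text_len : Int) (num_samples : Int) (out : List String) : Decidable (Spec_sample_from_big_string big_str text_len num_samples out) := by unfold Spec_sample_from_big_string; infer_instance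

-- ===== CLAIM (what is proved, stated in full; the proofs are below) =====
def Claim_equal_sample_from_big_string : Prop := ∀ (big_str : String) (text_len : Int) (num_samples : Int), Dom_sample_from_big_string big_str text_len num_samples → Spec_sample_from_big_string big_str text_len num_samples (sample_from_big_string big_str text_len num_samples)

-- ===== LEMMAS AND PROOFS =====

def posOf (s : List Char) : List Int :=
  ((PySem.List.enumerate s).filter (fun p => p.2 == ' ')).map (fun p => p.1)

lemma mem_posOf (s : List Char) (x : Int) :
    x ∈ posOf s ↔ ∃ (j : Nat) (h : j < s.length), x = (j : Int) ∧ s[j] = ' ' := by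
  simp only [posOf, List.mem_map, List.mem_filter, PySem.List.mem_enumerate_iff]
  constructor
  · rintro ⟨p, ⟨⟨k, hk, rfl⟩, hsp⟩, rfl⟩
    exact ⟨k, hk, by simp, by simpa using hsp⟩
  · rintro ⟨j, hj, rfl, hsj⟩
    exact ⟨((j : Int), s[j]), ⟨⟨j, hj, by simp⟩, by simp [hsj]⟩, rfl⟩

lemma pairwise_posOf (s : List Char) : (posOf s).Pairwise (· ≤ ·) := by
  refine List.Pairwise.map (fun p : Int × Char => p.1) (fun a b h => le_of_lt h) ?_
  exact (PySem.List.pairwise_lt_enumerate s 0).filter (fun p => p.2 == ' ')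

lemma space_prefix_drop (s : List Char) (m : Nat) (hm : m < s.length) (hs : s[m] = ' ') :
    [' '] <+: s.drop m := by
  rw [List.drop_eq_getElem_cons hm, hs]
  exact ⟨s.drop (m+1), rfl⟩

lemma prefix_drop_space (s : List Char) (m : Nat) (h : [' '] <+: s.drop m) :
    ∃ hm : m < s.length, s[m] = ' ' := by
  obtain ⟨t, ht⟩ := h
  have hlen : m < s.length := by
    by_contra hge
    rw [List.drop_eq_nil_of_le (by omega)] at ht
    simp at ht
  refine ⟨hlen, ?_⟩
  rw [List.drop_eq_getElem_cons hlen] at ht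
  have := congrArg (fun l => l.head?) ht.symm
  simpa [List.getElem?_eq_getElem hlen] using this

lemma findFrom_eq_bisect (s : List Char) (k : Int) (hk : 0 ≤ k) :
    PySem.Chars.findFrom s [' '] k none =
      (if h : PySem.List.bisectLeft (posOf s) k < (posOf s).length
        then (posOf s)[PySem.List.bisectLeft (posOf s) k] else -1) := by
  set P := posOf s with hP
  set j := PySem.List.bisectLeft P k with hj
  obtain ⟨hjlen, hlt, hge⟩ := PySem.List.bisectLeft_spec P k (pairwise_posOf s)
  by_cases hkn : k ≤ (s.length : Int)
  · -- k within the string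
    have hk2 : k = ((k.toNat : Nat) : Int) := by omega
    have hkn' : k.toNat ≤ s.length := by omega
    rw [hk2, PySem.Chars.findFrom_natCast s [' '] k.toNat hkn']
    by_cases hf : PySem.Chars.find (s.drop k.toNat) [' '] = -1
    · rw [if_pos hf, dif_neg]
      intro hjl
      have hmem := (mem_posOf s _).mp (List.getElem_mem hjl)
      obtain ⟨m, hm, hPj, hsp⟩ := hmem
      have hkm : k ≤ (m : Int) := by have := hge j hjl le_rfl; rw [hPj] at this; omega
      have : [' '] <+: (s.drop k.toNat).drop (m - k.toNat) := by
        rw [List.drop_drop]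
        have : k.toNat + (m - k.toNat) = m := by omega
        rw [this]
        exact space_prefix_drop s m hm hsp
      have hinf : [' '] <:+: s.drop k.toNat := this.isInfix.trans (List.drop_suffix _ _).isInfix
      exact (PySem.Chars.find_eq_neg_one_iff _ _).mp hf hinf
    · rw [if_neg hf]
      set r := PySem.Chars.find (s.drop k.toNat) [' '] with hr
      have hr0 : 0 ≤ r := by have := PySem.Chars.neg_one_le_find (s.drop k.toNat) [' ']; omega
      obtain ⟨hpre, hmin⟩ := PySem.Chars.find_spec (s := s.drop k.toNat) (sub := [' ']) hr0
      rw [List.drop_drop] at hpre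
      set m := k.toNat + r.toNat with hmdef
      obtain ⟨hmlt, hmsp⟩ := prefix_drop_space s m hpre
      have hmmem : ((m : Nat) : Int) ∈ P := (mem_posOf s _).mpr ⟨m, hmlt, rfl, hmsp⟩
      obtain ⟨idx, hidx, hPidx⟩ := List.getElem_of_mem hmmem
      have hkm : k ≤ ((m : Nat) : Int) := by omega
      -- j < P.length
      have hjl : j < P.length := by
        rcases Nat.lt_or_ge idx j with h' | h'
        · exact absurd (hPidx ▸ hlt idx hidx h') (by omega)
        · omega
      rw [dif_pos hjl]
      -- P[j] is a space index p with k.toNat ≤ p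
      obtain ⟨p, hp, hPj, hsp⟩ := (mem_posOf s _).mp (List.getElem_mem hjl)
      have hkp : k.toNat ≤ p := by have := hge j hjl le_rfl; rw [hPj] at this; omega
      -- minimality: no space index in [k.toNat, m)
      have hpm : m ≤ p := by
        by_contra hlt'
        have : ¬ [' '] <+: (s.drop k.toNat).drop (p - k.toNat) := hmin (p - k.toNat) (by omega)
        rw [List.drop_drop, (by omega : k.toNat + (p - k.toNat) = p)] at this
        exact this (space_prefix_drop s p hp hsp)
      -- sortedness: P[j] ≤ P[idx] = m when j ≤ idx
      have hjle : j ≤ idx := by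
        by_contra h'
        have := hlt idx hidx (by omega)
        omega
      have hPjm : P[j] ≤ ((m : Nat) : Int) := by
        rcases Nat.lt_or_ge j idx with h' | h'
        · have h2 := (List.pairwise_iff_getElem.mp (pairwise_posOf s)) j idx hjl hidx h'
          rw [hPidx] at h2
          exact h2
        · have hje : j = idx := by omega
          simp only [hje]
          rw [hPidx]
      have : P[j] = ((m : Nat) : Int) := by rw [hPj] at hPjm ⊢; omega
      rw [this]
      omega
  · -- k past the end of the string: both sides -1
    have hno : ¬ j < P.length := by
      intro hjl
      obtain ⟨m, hm, hPj, _⟩ := (mem_posOf s _).mp (List.getElem_mem hjl)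
      have := hge j hjl le_rfl
      omega
    rw [dif_neg hno]
    simp only [PySem.Chars.findFrom]
    rw [if_neg (by omega : ¬ k < 0), if_pos (by omega : (s.length : Int) < k)]

lemma findFrom_clamp (s sub : List Char) (v : Int) :
    PySem.Chars.findFrom s sub v none =
      PySem.Chars.findFrom s sub (if v < 0 then max 0 ((s.length : Int) + v) else v) none := by
  by_cases h1 : v < 0
  · simp only [PySem.Chars.findFrom, if_pos h1]
    have e1 : ¬ (max 0 ((s.length:Int) + v)) < 0 := by omega
    have e2 : (if v + (s.length:Int) < 0 then 0 else v + (s.length:Int)) = max 0 ((s.length:Int) + v) := by split_ifs <;> omega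
    simp only [if_neg e1, e2]
  · simp [h1]

lemma posOf_nonneg (s : List Char) (x : Int) (hx : x ∈ posOf s) : 0 ≤ x := by
  obtain ⟨j, _, rfl, _⟩ := (mem_posOf s x).mp hx
  positivity

lemma spaceAtOrAfter_eq (s : List Char) (v : Int) :
    spaceAtOrAfter (posOf s) (s.length : Int) v =
      (if PySem.Chars.findFrom s [' '] v none = -1 then none
        else some (PySem.Chars.findFrom s [' '] v none)) := by
  rw [findFrom_clamp s [' '] v]
  set k' := if v < 0 then max 0 ((s.length : Int) + v) else v with hk'
  have hk0 : 0 ≤ k' := by rw [hk']; split_ifs <;> omega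
  rw [findFrom_eq_bisect s k' hk0]
  unfold spaceAtOrAfter
  simp only [← hk']
  by_cases h : PySem.List.bisectLeft (posOf s) k' < (posOf s).length
  · have hne : ¬ (posOf s)[PySem.List.bisectLeft (posOf s) k'] = -1 := by
      have := posOf_nonneg s _ (List.getElem_mem h)
      omega
    simp only [dif_pos h, if_neg hne]
  · simp [dif_neg h]

lemma findFrom_space_nonneg (s : List Char) (v : Int)
    (h : PySem.Chars.findFrom s [' '] v none ≠ -1) :
    0 ≤ PySem.Chars.findFrom s [' '] v none := by
  rw [findFrom_clamp s [' '] v] at h ⊢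
  set k' := if v < 0 then max 0 ((s.length : Int) + v) else v with hk'
  have hk0 : 0 ≤ k' := by rw [hk']; split_ifs <;> omega
  rw [findFrom_eq_bisect s k' hk0] at h ⊢
  by_cases hl : PySem.List.bisectLeft (posOf s) k' < (posOf s).length
  · rw [dif_pos hl]
    exact posOf_nonneg s _ (List.getElem_mem hl)
  · rw [dif_neg hl] at h
    exact absurd rfl h

lemma slice_zero_empty (big : String) (k : Int) (hk : 0 ≤ k) :
    PySem.Str.slice big (some k) (some 0) = "" := by
  simp [PySem.Str.slice, PySem.Chars.slice, PySem.List.slice_toNat big.toList hk le_rfl]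

-- A's str.find(" ", v) agrees with B's bisect helper on the space-position list
lemma step_find_eq (big : String) (v : Int) :
    spaceAtOrAfter (posOf big.toList) (PySem.Str.len big) v =
      (if PySem.Str.findFrom big " " v = -1 then none
        else some (PySem.Str.findFrom big " " v)) := by
  rw [PySem.Str.findFrom_eq, PySem.Str.len_eq]
  exact spaceAtOrAfter_eq big.toList v

-- ===== VERDICT (by name: the statement is the Claim_ definition above) =====
theorem sample_from_big_string_spec : Claim_equal_sample_from_big_string := by
  intro big_str text_len num_samples _
  unfold Spec_sample_from_big_string sample_from_big_string sample_from_big_string_alt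
  refine (PySem.List.foldl_congr_mem _ _ _ _ ?_).symm
  intro acc i _
  have hpos : ((PySem.List.enumerate big_str.toList).filter (fun p => p.2 == ' ')).map
      (fun p => p.1) = posOf big_str.toList := rfl
  simp only [hpos]
  rw [step_find_eq big_str]
  by_cases h1 : PySem.Str.findFrom big_str " " (PySem.Int.floordiv (i * PySem.Str.len big_str) num_samples) = -1
  · simp only [if_pos h1]
  · simp only [if_neg h1]
    have hstart0 : 0 ≤ PySem.Str.findFrom big_str " " (PySem.Int.floordiv (i * PySem.Str.len big_str) num_samples) := by
      rw [PySem.Str.findFrom_eq]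
      rw [PySem.Str.findFrom_eq] at h1
      exact findFrom_space_nonneg big_str.toList _ h1
    rw [step_find_eq big_str]
    by_cases h2 : PySem.Str.findFrom big_str " " (PySem.Str.findFrom big_str " " (PySem.Int.floordiv (i * PySem.Str.len big_str) num_samples) + text_len) = -1
    · simp only [if_pos h2]
      rw [slice_zero_empty big_str _ hstart0]
    · simp only [if_neg h2]
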